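-- pv_equiv track=rewrite | github.com/josteint/sidfinity | src/verify_note_extraction.py | extract_runs
-- ===== SOURCE A (Python) =====
-- def extract_runs(frames, voice, key='fhi'):
--     """
--     Extract consecutive runs where SID register [key][voice] stays constant.
--     Returns list of (value, start_frame, duration) tuples.
--     """
--     runs = []
--     if not frames:
--         return runs
--     cur_val   = frames[0][key][voice]
--     cur_start = 0
--     for fr in range(1, len(frames)):
--         val = frames[fr][key][voice]
--         if val != cur_val:
--             runs.append((cur_val, cur_start, fr - cur_start))
--             cur_val   = val
--             cur_start = fr
--     runs.append((cur_val, cur_start, len(frames) - cur_start))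
--     return runs
-- ===== SOURCE B (Python) =====
-- def extract_runs(frames, voice, key='fhi'):
--     """
--     Extract consecutive runs where SID register [key][voice] stays constant.
--     Returns list of (value, start_frame, duration) tuples.
--     """
--     runs = []
--     n = len(frames)
--     i = 0
--     while i < n:
--         v = frames[i][key][voice]
--         j = i + 1
--         while j < n and frames[j][key][voice] == v:
--             j += 1
--         runs.append((v, i, j - i))
--         i = j
--     return runs
-- ===== Notes on version B (the rewrite author's own statement) =====
-- stated objective: alternative
-- what changed: Replaces A's single-pass change detection with carried cur_val/cur_start state and a final flush append by a two-pointer scan: an inner loop advances j to the end of each maximal constant run and appends (value, i, j - i), so no carried run state, no trailing flush and no empty-list special case are needed.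
import Mathlib
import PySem

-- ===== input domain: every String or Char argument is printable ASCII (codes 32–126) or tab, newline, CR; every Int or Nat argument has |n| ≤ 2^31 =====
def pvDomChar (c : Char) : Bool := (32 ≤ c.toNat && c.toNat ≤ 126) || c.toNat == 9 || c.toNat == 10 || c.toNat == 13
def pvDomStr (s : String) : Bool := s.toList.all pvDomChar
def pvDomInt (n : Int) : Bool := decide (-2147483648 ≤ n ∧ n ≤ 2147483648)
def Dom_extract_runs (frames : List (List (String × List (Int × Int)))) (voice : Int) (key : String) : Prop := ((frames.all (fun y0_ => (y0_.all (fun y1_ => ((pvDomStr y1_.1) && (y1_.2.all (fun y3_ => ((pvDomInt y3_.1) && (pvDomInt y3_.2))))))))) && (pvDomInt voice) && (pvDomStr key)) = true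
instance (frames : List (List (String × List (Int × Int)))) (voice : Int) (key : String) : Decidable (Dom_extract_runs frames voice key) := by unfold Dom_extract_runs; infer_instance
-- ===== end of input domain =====

-- B replaces A's change-detection pass (carried cur_val/cur_start plus a final flush) by a
-- two-pointer scan that extracts each maximal run with an inner loop; same O(n) cost ("alternative").

-- frames[fr][key][voice] as an Option: first-match lookup of `key` in the frame dict,
-- then first-match lookup of `voice` in the register dict; none = KeyError (excluded by Pre_).
def pvVal? (voice : Int) (key : String) (f : List (String × List (Int × Int))) : Option Int :=
  (f.find? (fun p => p.1 == key)).bind (fun d => (d.2.find? (fun p => p.1 == voice)).map Prod.snd)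

-- total version used by both ports (Pre_ guarantees the lookup succeeds)
def pvVal (voice : Int) (key : String) (f : List (String × List (Int × Int))) : Int :=
  (pvVal? voice key f).getD 0

-- ===== PORT A =====
def extract_runs (frames : List (List (String × List (Int × Int)))) (voice : Int) (key : String) : List (Int × Int × Int) :=
  match frames with
  | [] => []
  | f0 :: _ =>
    let st := (PySem.List.pyRange 1 (PySem.List.len frames) 1).foldl
      (fun (s : List (Int × Int × Int) × Int × Int) fr =>
        let val := pvVal voice key (PySem.List.pyGetD frames fr [])
        if val ≠ s.2.1 then (s.1 ++ [(s.2.1, s.2.2, fr - s.2.2)], val, fr) else s)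
      ([], pvVal voice key f0, 0)
    st.1 ++ [(st.2.1, st.2.2, PySem.List.len frames - st.2.2)]

-- ===== PORT B =====
-- inner while loop: count of consecutive frames whose value equals v, and the remainder
def pvTakeRun (voice : Int) (key : String) (v : Int) :
    List (List (String × List (Int × Int))) → Int × List (List (String × List (Int × Int)))
  | [] => (0, [])
  | f :: fs =>
    if pvVal voice key f = v then
      let r := pvTakeRun voice key v fs
      (r.1 + 1, r.2)
    else (0, f :: fs)

theorem pvTakeRun_len_le (voice : Int) (key : String) (v : Int)
    (fs : List (List (String × List (Int × Int)))) :
    (pvTakeRun voice key v fs).2.length ≤ fs.length := by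
  induction fs with
  | nil => simp [pvTakeRun]
  | cons f fs ih =>
    simp only [pvTakeRun]
    split
    · exact Nat.le_succ_of_le ih
    · simp

-- outer while loop over the remaining frames, i = index of the first of them
def pvGo (voice : Int) (key : String) :
    List (List (String × List (Int × Int))) → Int → List (Int × Int × Int)
  | [], _ => []
  | f :: rest, i =>
    let v := pvVal voice key f
    let r := pvTakeRun voice key v rest
    let j := i + 1 + r.1
    (v, i, j - i) :: pvGo voice key r.2 j
termination_by fs _ => fs.length
decreasing_by
  exact Nat.lt_succ_of_le (pvTakeRun_len_le voice key (pvVal voice key f) rest)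

def extract_runs_alt (frames : List (List (String × List (Int × Int)))) (voice : Int) (key : String) : List (Int × Int × Int) :=
  pvGo voice key frames 0

-- ===== PRECONDITION & SPEC =====
-- Pre_ excludes exactly the inputs where Python raises KeyError: some frame lacks `key`,
-- or its register dict lacks `voice`.
def Pre_extract_runs (frames : List (List (String × List (Int × Int)))) (voice : Int) (key : String) : Prop :=
  ∀ f ∈ frames, ∃ p ∈ f, p.1 = key ∧ ∃ q ∈ p.2, q.1 = voice
instance (frames : List (List (String × List (Int × Int)))) (voice : Int) (key : String) : Decidable (Pre_extract_runs frames voice key) := by unfold Pre_extract_runs; infer_instance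

def pvWitness_extract_runs : (List (List (String × List (Int × Int)))) × Int × String :=
  ([[("fhi", [(0, 7), (1, 9)])], [("fhi", [(0, 7), (1, 2)])], [("fhi", [(0, 3), (1, 2)])]], 0, "fhi")

def Spec_extract_runs (frames : List (List (String × List (Int × Int)))) (voice : Int) (key : String) (out : List (Int × Int × Int)) : Prop := out = extract_runs_alt frames voice key
instance (frames : List (List (String × List (Int × Int)))) (voice : Int) (key : String) (out : List (Int × Int × Int)) : Decidable (Spec_extract_runs frames voice key out) := by unfold Spec_extract_runs; infer_instance

-- ===== CLAIM (what is proved, stated in full; the proofs are below) =====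
def Claim_equal_extract_runs : Prop := ∀ (frames : List (List (String × List (Int × Int)))) (voice : Int) (key : String), Dom_extract_runs frames voice key → Pre_extract_runs frames voice key → Spec_extract_runs frames voice key (extract_runs frames voice key)

-- ===== LEMMAS AND PROOFS =====

-- value-level mirror of A's loop: cv's run started at cs, i = index of the head of vs
def vRunsFrom (cv cs i : Int) : List Int → List (Int × Int × Int)
  | [] => [(cv, cs, i - cs)]
  | v :: vs => if v ≠ cv then (cv, cs, i - cs) :: vRunsFrom v i (i + 1) vs
               else vRunsFrom cv cs (i + 1) vs

-- value-level mirror of pvTakeRun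
def vTake (v : Int) : List Int → Int × List Int
  | [] => (0, [])
  | w :: vs => if w = v then let r := vTake v vs; (r.1 + 1, r.2) else (0, w :: vs)

theorem vTake_len_le (v : Int) (vs : List Int) : (vTake v vs).2.length ≤ vs.length := by
  induction vs with
  | nil => simp [vTake]
  | cons w vs ih =>
    simp only [vTake]
    split
    · exact Nat.le_succ_of_le ih
    · simp

-- value-level mirror of pvGo
def vGo : List Int → Int → List (Int × Int × Int)
  | [], _ => []
  | v :: vs, i =>
    let r := vTake v vs
    let j := i + 1 + r.1
    (v, i, j - i) :: vGo r.2 j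
termination_by vs _ => vs.length
decreasing_by exact Nat.lt_succ_of_le (vTake_len_le v vs)

theorem pvTakeRun_eq_vTake (voice : Int) (key : String) (v : Int)
    (fs : List (List (String × List (Int × Int)))) :
    vTake v (fs.map (pvVal voice key)) =
      ((pvTakeRun voice key v fs).1, (pvTakeRun voice key v fs).2.map (pvVal voice key)) := by
  induction fs with
  | nil => simp [vTake, pvTakeRun]
  | cons f fs ih =>
    simp only [List.map_cons, vTake, pvTakeRun]
    split
    · simp [ih]
    · simp

theorem pvGo_eq_vGo (voice : Int) (key : String) :
    ∀ (n : Nat) (fs : List (List (String × List (Int × Int)))), fs.length ≤ n →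
    ∀ (i : Int), pvGo voice key fs i = vGo (fs.map (pvVal voice key)) i := by
  intro n
  induction n with
  | zero =>
    intro fs hn i
    match fs with
    | [] => simp [pvGo, vGo]
    | f :: rest => simp at hn
  | succ n ih =>
    intro fs hn i
    match fs with
    | [] => simp [pvGo, vGo]
    | f :: rest =>
      rw [List.map_cons, pvGo, vGo]
      simp only [pvTakeRun_eq_vTake voice key]
      exact congrArg _ (ih _ (le_trans (pvTakeRun_len_le voice key _ rest) (Nat.le_of_succ_le_succ hn)) _)

-- A's loop, with the frame access abstracted into g : index → value
theorem loopA_spec (g : Int → Int) (vs : List Int) :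
    ∀ (i : Int), (∀ k : Nat, (h : k < vs.length) → g (i + k) = vs[k]) →
    ∀ (runs : List (Int × Int × Int)) (cv cs : Int),
    (let st := (PySem.List.pyRange i (i + vs.length) 1).foldl
        (fun (s : List (Int × Int × Int) × Int × Int) fr =>
          let val := g fr
          if val ≠ s.2.1 then (s.1 ++ [(s.2.1, s.2.2, fr - s.2.2)], val, fr) else s)
        (runs, cv, cs)
     st.1 ++ [(st.2.1, st.2.2, (i + vs.length) - st.2.2)]) = runs ++ vRunsFrom cv cs i vs := by
  induction vs with
  | nil =>
    intro i hg runs cv cs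
    simp only [List.length_nil, Nat.cast_zero, add_zero]
    rw [PySem.List.pyRange_one_eq_nil (le_refl i)]
    simp [vRunsFrom]
  | cons v vs ih =>
    intro i hg runs cv cs
    have hgi : g i = v := by simpa using hg 0 (by simp)
    have hg' : ∀ k : Nat, (h : k < vs.length) → g ((i + 1) + k) = vs[k] := by
      intro k hk
      have h2 := hg (k + 1) (by simpa using Nat.succ_lt_succ hk)
      rw [show i + (((k + 1 : Nat) : Nat) : Int) = (i + 1) + (k : Int) from by push_cast; ring] at h2
      simpa using h2
    rw [show i + (((v :: vs).length : Nat) : Int) = (i + 1) + (vs.length : Int) from by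
      push_cast [List.length_cons]; ring]
    rw [PySem.List.pyRange_one_cons (by omega), List.foldl_cons]
    simp only [hgi, ne_eq]
    by_cases hv : v = cv
    · rw [if_neg (not_not_intro hv), vRunsFrom, if_neg (not_not_intro hv)]
      subst hv
      exact ih (i + 1) hg' runs v cs
    · rw [if_pos hv, vRunsFrom, if_pos hv]
      have := ih (i + 1) hg' (runs ++ [(cv, cs, i - cs)]) v i
      rw [this, List.append_assoc]
      rfl

-- A on a nonempty frame list, expressed on the value list
theorem extract_runs_cons (f0 : List (String × List (Int × Int)))
    (rest : List (List (String × List (Int × Int)))) (voice : Int) (key : String) :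
    extract_runs (f0 :: rest) voice key
      = vRunsFrom (pvVal voice key f0) 0 1 (rest.map (pvVal voice key)) := by
  have hg : ∀ k : Nat, (h : k < (rest.map (pvVal voice key)).length) →
      pvVal voice key (PySem.List.pyGetD (f0 :: rest) ((1 : Int) + k) []) =
        (rest.map (pvVal voice key))[k] := by
    intro k hk
    have hk' : k < rest.length := by simpa using hk
    have h1 : ((1 : Int) + k) = ((k + 1 : Nat) : Int) := by push_cast; ring
    rw [h1, PySem.List.pyGetD_natCast]
    simp [List.getD, List.getElem?_cons_succ, List.getElem?_eq_getElem hk']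
  have h := loopA_spec (fun fr => pvVal voice key (PySem.List.pyGetD (f0 :: rest) fr []))
      (rest.map (pvVal voice key)) 1 hg [] (pvVal voice key f0) 0
  simp only [List.nil_append] at h
  rw [show ((1 : Int) + (((rest.map (pvVal voice key)).length : Nat) : Int))
      = PySem.List.len (f0 :: rest) from by
    rw [PySem.List.len_eq]; push_cast [List.length_map, List.length_cons]; ring] at h
  exact h

-- A's value-level form equals B's: vRunsFrom peels exactly one maximal run
theorem vRunsFrom_eq_vGo (vs : List Int) :
    ∀ (cv cs i : Int),
      vRunsFrom cv cs i vs
        = (cv, cs, (i + (vTake cv vs).1) - cs) :: vGo (vTake cv vs).2 (i + (vTake cv vs).1) := by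
  induction vs with
  | nil => intro cv cs i; simp [vRunsFrom, vTake, vGo]
  | cons v vs ih =>
    intro cv cs i
    by_cases hv : v = cv
    · subst hv
      rw [vRunsFrom, if_neg (not_not_intro rfl), ih v cs (i + 1)]
      simp only [vTake, if_true]
      rw [show i + ((vTake v vs).1 + 1) = (i + 1) + (vTake v vs).1 from by ring]
    · rw [vRunsFrom, if_pos hv]
      simp only [vTake, if_neg hv]
      rw [ih v i (i + 1), vGo]
      simp only [add_zero]

-- ===== VERDICT (by name: the statement is the Claim_ definition above) =====
theorem extract_runs_spec : Claim_equal_extract_runs := by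
  intro frames voice key _hdom _hpre
  unfold Spec_extract_runs extract_runs_alt
  match frames with
  | [] => simp [extract_runs, pvGo]
  | f0 :: rest =>
    rw [extract_runs_cons, pvGo_eq_vGo voice key (f0 :: rest).length (f0 :: rest) (le_refl _),
        List.map_cons, vGo,
        vRunsFrom_eq_vGo (rest.map (pvVal voice key)) (pvVal voice key f0) 0 1]
    simp
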